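-- pv_equiv track=rewrite | github.com/IvanRenison/ProgrammingProblems | Competitive Programming 4 The Lower Bound of Programming Contests in the 2020s/2.2.c.6_imageprocessing.py | solve
-- ===== SOURCE A (Python) =====
-- from typing import List, Tuple
--
-- def inner_product(A: List[List[int]], B: List[List[int]]) -> int:
--     N: int = len(A)
--     M: int = len(A[0])
--     ans: int = 0
--     for i in range(N):
--         for j in range(M):
--             ans += A[i][j] * B[i][j]
--     return ans
--
-- def solve(image: List[List[int]], kernel: List[List[int]]) -> List[List[int]]:
--     H: int = len(image)
--     W: int = len(image[0])
--     N: int = len(kernel)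
--     M: int = len(kernel[0])
--
--     ans: List[List[int]] = [
--         [0 for _ in range(W - M + 1)] for _ in range(H - N + 1)]
--     c_kernel: List[List[int]] = [
--         [kernel[i][j] for j in range(M-1, -1, -1)] for i in range(N-1, -1, -1)]
--
--     for i in range(H - N + 1):
--         for j in range(W - M + 1):
--             ans[i][j] = inner_product(
--                 [image[i + k][j:j + M] for k in range(N)], c_kernel)
--
--     return ans
-- ===== SOURCE B (Python) =====
-- def solve(image, kernel):
--     H = len(image)
--     W = len(image[0])
--     N = len(kernel)
--     M = len(kernel[0])
--     out = [[0] * (W - M + 1) for _ in range(H - N + 1)]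
--     for p, krow in enumerate(kernel):
--         for q, v in enumerate(krow):
--             out = [[x + v * image[i + N - 1 - p][j + M - 1 - q]
--                     for j, x in enumerate(row)]
--                    for i, row in enumerate(out)]
--     return out
-- ===== Notes on version B (the rewrite author's own statement) =====
-- stated objective: alternative
-- what changed: A computes each output cell by an inner_product over an N x M window copied out of the image with a pre-flipped kernel; B never builds windows or flips the kernel: it iterates over the kernel entries once and accumulates each entry's shifted contribution into the whole output matrix.
-- outside the precondition, e.g. on solve([[1, 2, 3], [4, 5]], [[1]]): A returns [[1, 2, 3], [4, 5, 0]], B raises IndexError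
import Mathlib
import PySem

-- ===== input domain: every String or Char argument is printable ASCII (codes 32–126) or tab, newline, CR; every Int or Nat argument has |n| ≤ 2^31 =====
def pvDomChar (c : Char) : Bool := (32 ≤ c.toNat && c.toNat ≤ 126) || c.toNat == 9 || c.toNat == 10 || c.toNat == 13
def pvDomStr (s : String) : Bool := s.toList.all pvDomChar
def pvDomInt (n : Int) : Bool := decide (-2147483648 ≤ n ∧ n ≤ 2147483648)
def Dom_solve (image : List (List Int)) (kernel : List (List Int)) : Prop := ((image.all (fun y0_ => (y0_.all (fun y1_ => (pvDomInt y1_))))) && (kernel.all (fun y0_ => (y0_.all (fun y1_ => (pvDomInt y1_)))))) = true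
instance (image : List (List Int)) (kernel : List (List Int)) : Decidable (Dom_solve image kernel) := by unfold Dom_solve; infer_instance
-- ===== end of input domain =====

-- B replaces A's per-cell inner products over copied windows (with a pre-flipped kernel)
-- by a single accumulation pass over the kernel entries; proved to return the same matrix.


-- ===== PORT A =====
def innerProduct (A B : List (List Int)) : Int :=
  let N : Int := PySem.List.len A
  let M : Int := PySem.List.len (PySem.List.pyGetD A 0 [])
  (PySem.List.pyRange 0 N).foldl (fun ans i =>
    (PySem.List.pyRange 0 M).foldl (fun ans j =>
      ans + PySem.List.pyGetD (PySem.List.pyGetD A i []) j 0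
          * PySem.List.pyGetD (PySem.List.pyGetD B i []) j 0) ans) 0

-- Python builds a zero matrix and then assigns every cell; ported as the comprehension
-- computing each cell's assigned value.
def solve (image : List (List Int)) (kernel : List (List Int)) : List (List Int) :=
  let H : Int := PySem.List.len image
  let W : Int := PySem.List.len (PySem.List.pyGetD image 0 [])
  let N : Int := PySem.List.len kernel
  let M : Int := PySem.List.len (PySem.List.pyGetD kernel 0 [])
  let cKernel : List (List Int) :=
    (PySem.List.pyRange (N - 1) (-1) (-1)).map (fun i =>
      (PySem.List.pyRange (M - 1) (-1) (-1)).map (fun j =>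
        PySem.List.pyGetD (PySem.List.pyGetD kernel i []) j 0))
  (PySem.List.pyRange 0 (H - N + 1)).map (fun i =>
    (PySem.List.pyRange 0 (W - M + 1)).map (fun j =>
      innerProduct ((PySem.List.pyRange 0 N).map (fun k =>
        PySem.List.slice (PySem.List.pyGetD image (i + k) []) (some j) (some (j + M)))) cKernel))

-- ===== PORT B =====
def solve_alt (image : List (List Int)) (kernel : List (List Int)) : List (List Int) :=
  let H : Int := PySem.List.len image
  let W : Int := PySem.List.len (PySem.List.pyGetD image 0 [])
  let N : Int := PySem.List.len kernel
  let M : Int := PySem.List.len (PySem.List.pyGetD kernel 0 [])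
  let init : List (List Int) := List.replicate (H - N + 1).toNat (List.replicate (W - M + 1).toNat 0)
  (PySem.List.enumerate kernel).foldl (fun out pk =>
    (PySem.List.enumerate pk.2).foldl (fun out qv =>
      (PySem.List.enumerate out).map (fun ir =>
        (PySem.List.enumerate ir.2).map (fun jx =>
          jx.2 + qv.2 * PySem.List.pyGetD (PySem.List.pyGetD image (ir.1 + N - 1 - pk.1) [])
                           (jx.1 + M - 1 - qv.1) 0))) out) init

-- ===== PRECONDITION & SPEC =====
-- Pre_ excludes empty image/kernel (A raises IndexError on image[0] / kernel[0]) and the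
-- ragged ones that the output's cells actually read, where A's slice-based windows silently
-- shrink or ignore surplus kernel entries (yielding accidental values or an IndexError in
-- inner_product) while B indexes those entries directly; ragged inputs whose rag is never
-- read (empty output, or surplus image cells right of every window) stay inside.
def Pre_solve (image : List (List Int)) (kernel : List (List Int)) : Prop :=
  image ≠ [] ∧ kernel ≠ [] ∧
  (∀ r ∈ kernel, (kernel.headD []).length ≤ r.length) ∧
  (((∀ r ∈ image, (image.headD []).length ≤ r.length) ∧
    (∀ r ∈ kernel, r.length = (kernel.headD []).length)) ∨
   image.length < kernel.length ∨
   (image.headD []).length < (kernel.headD []).length)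
instance (image : List (List Int)) (kernel : List (List Int)) : Decidable (Pre_solve image kernel) := by unfold Pre_solve; infer_instance

def pvWitness_solve : List (List Int) × List (List Int) :=
  ([[1, 2, 3], [4, 5, 6], [7, 8, 9]], [[1, 0], [0, -1]])

def Spec_solve (image : List (List Int)) (kernel : List (List Int)) (out : List (List Int)) : Prop := out = solve_alt image kernel
instance (image : List (List Int)) (kernel : List (List Int)) (out : List (List Int)) : Decidable (Spec_solve image kernel out) := by unfold Spec_solve; infer_instance

-- ===== CLAIM (what is proved, stated in full; the proofs are below) =====
def Claim_equal_solve : Prop := ∀ (image : List (List Int)) (kernel : List (List Int)), Dom_solve image kernel → Pre_solve image kernel → Spec_solve image kernel (solve image kernel)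

-- ===== LEMMAS AND PROOFS =====

-- matrix whose (i, j) entry is f i j
def Mk (OH OW : Nat) (f : Nat → Nat → Int) : List (List Int) :=
  (List.range OH).map (fun i => (List.range OW).map (fun j => f i j))

theorem Mk_congr {OH OW : Nat} {f g : Nat → Nat → Int}
    (h : ∀ i < OH, ∀ j < OW, f i j = g i j) : Mk OH OW f = Mk OH OW g := by
  unfold Mk
  apply List.map_congr_left
  intro i hi
  apply List.map_congr_left
  intro j hj
  exact h i (List.mem_range.mp hi) j (List.mem_range.mp hj)

theorem enum_eq {α : Type} (d : α) : ∀ (l : List α) (s : Int),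
    PySem.List.enumerate l s = (List.range l.length).map (fun (k : Nat) => (s + (k : Int), l.getD k d)) := by
  intro l
  induction l with
  | nil => intro s; simp [PySem.List.enumerate]
  | cons x t ih =>
    intro s
    simp only [PySem.List.enumerate, List.length_cons, List.range_succ_eq_map, List.map_cons,
      List.map_map]
    refine List.cons_eq_cons.mpr ⟨by simp, ?_⟩
    rw [ih (s + 1)]
    apply List.map_congr_left
    intro k hk
    simp only [Function.comp, List.getD_cons_succ, Prod.mk.injEq, Nat.succ_eq_add_one]
    exact ⟨by push_cast; ring, trivial⟩

theorem pyRange0 (b : Int) :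
    PySem.List.pyRange 0 b = (List.range b.toNat).map (fun (k : Nat) => (k : Int)) := by
  simp only [PySem.List.pyRange]
  by_cases h : 0 < b
  · rw [if_neg (by norm_num), if_pos (by norm_num), if_pos h]
    have hd : (b - 0 + 1 - 1) / 1 = b := by omega
    rw [hd]
    apply List.map_congr_left; intro k hk; omega
  · rw [if_neg (by norm_num), if_pos (by norm_num), if_neg h]
    have h0 : b.toNat = 0 := by omega
    simp [h0]

theorem pyRangeRev (n : Nat) :
    PySem.List.pyRange ((n : Int) - 1) (-1) (-1)
      = (List.range n).map (fun (k : Nat) => ((n : Int) - 1 - (k : Int))) := by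
  simp only [PySem.List.pyRange]
  rw [if_neg (by omega), if_neg (by omega)]
  rcases Nat.eq_zero_or_pos n with h | h
  · subst h; rw [if_neg (by omega)]; simp
  · rw [if_pos (by omega)]
    have h2 : (((n : Int) - 1 - -1 + - -1 - 1) / - -1) = (n : Int) := by norm_num
    rw [h2, Int.toNat_natCast]
    apply List.map_congr_left; intro k hk; ring

theorem sum_list_range (n : Nat) (f : Nat → Int) :
    ∑ k ∈ Finset.range n, f k = ((List.range n).map f).sum := by
  induction n with
  | zero => simp
  | succ m ih => rw [Finset.sum_range_succ, List.range_succ]; simp [ih]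

theorem take_drop_getD (xs : List Int) (a m l : Nat) (hl : l < m) (hm : a + m ≤ xs.length) :
    (List.take m (List.drop a xs)).getD l 0 = xs.getD (a + l) 0 := by
  have h1 : l < (List.take m (List.drop a xs)).length := by simp; omega
  have h2 : a + l < xs.length := by omega
  rw [List.getD_eq_getElem _ _ h1, List.getD_eq_getElem _ _ h2]
  simp [List.getElem_take, List.getElem_drop]

theorem pyGetD_zero_headD {α : Type} (l : List α) (d : α) :
    PySem.List.pyGetD l 0 d = l.headD d := by
  have h := PySem.List.pyGetD_natCast l 0 d
  rw [show ((0 : Nat) : Int) = 0 by rfl] at h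
  rw [h]
  cases l <;> rfl

-- one kernel-entry update of a Mk-shaped matrix
theorem upd_Mk (image : List (List Int)) (N M pI qI v : Int) (OH OW : Nat) (f : Nat → Nat → Int) :
    ((PySem.List.enumerate (Mk OH OW f)).map (fun ir =>
      (PySem.List.enumerate ir.2).map (fun jx =>
        jx.2 + v * PySem.List.pyGetD (PySem.List.pyGetD image (ir.1 + N - 1 - pI) [])
                      (jx.1 + M - 1 - qI) 0)))
    = Mk OH OW (fun i j => f i j + v *
        PySem.List.pyGetD (PySem.List.pyGetD image ((i : Int) + N - 1 - pI) [])
          ((j : Int) + M - 1 - qI) 0) := by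
  unfold Mk
  rw [enum_eq ([] : List Int)]
  simp only [List.length_map, List.length_range, List.map_map]
  apply List.map_congr_left
  intro i hi
  have hi' : i < OH := List.mem_range.mp hi
  simp only [Function.comp, PySem.List.getD_map_range _ _ _ _ hi']
  rw [enum_eq (0 : Int)]
  simp only [List.length_map, List.length_range, List.map_map]
  apply List.map_congr_left
  intro j hj
  have hj' : j < OW := List.mem_range.mp hj
  simp only [Function.comp, PySem.List.getD_map_range _ _ _ _ hj', zero_add]

-- folding one kernel row over a Mk-shaped matrix
theorem row_fold (image : List (List Int)) (N M pI : Int) :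
    ∀ (krow : List Int) (q0 : Int) (OH OW : Nat) (f : Nat → Nat → Int),
    (PySem.List.enumerate krow q0).foldl (fun out qv =>
      (PySem.List.enumerate out).map (fun ir =>
        (PySem.List.enumerate ir.2).map (fun jx =>
          jx.2 + qv.2 * PySem.List.pyGetD (PySem.List.pyGetD image (ir.1 + N - 1 - pI) [])
                           (jx.1 + M - 1 - qv.1) 0))) (Mk OH OW f)
    = Mk OH OW (fun i j => f i j + ((List.range krow.length).map (fun q =>
        krow.getD q 0 * PySem.List.pyGetD (PySem.List.pyGetD image ((i : Int) + N - 1 - pI) [])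
          ((j : Int) + M - 1 - (q0 + (q : Int))) 0)).sum) := by
  intro krow
  induction krow with
  | nil =>
    intro q0 OH OW f
    simp only [PySem.List.enumerate, List.foldl_nil, List.length_nil, List.range_zero,
      List.map_nil, List.sum_nil]
    exact Mk_congr (fun i _ j _ => by ring)
  | cons v t ih =>
    intro q0 OH OW f
    have hcons : PySem.List.enumerate (v :: t) q0 = (q0, v) :: PySem.List.enumerate t (q0 + 1) := by
      simp [PySem.List.enumerate]
    rw [hcons, List.foldl_cons, upd_Mk, ih]
    apply Mk_congr
    intro i _ j _
    rw [List.length_cons, List.range_succ_eq_map, List.map_cons, List.map_map, List.sum_cons]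
    rw [add_assoc]
    congr 1
    congr 1
    · simp only [List.getD_cons_zero, Nat.cast_zero, add_zero]
    · apply congrArg
      apply List.map_congr_left
      intro q _
      simp only [Function.comp_apply, List.getD_cons_succ, Nat.succ_eq_add_one]
      congr 2
      push_cast; ring

-- folding the whole kernel over a Mk-shaped matrix
theorem outer_fold (image : List (List Int)) (N M : Int) :
    ∀ (ks : List (List Int)) (p0 : Int) (OH OW : Nat) (f : Nat → Nat → Int),
    (PySem.List.enumerate ks p0).foldl (fun out pk =>
      (PySem.List.enumerate pk.2).foldl (fun out qv =>
        (PySem.List.enumerate out).map (fun ir =>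
          (PySem.List.enumerate ir.2).map (fun jx =>
            jx.2 + qv.2 * PySem.List.pyGetD (PySem.List.pyGetD image (ir.1 + N - 1 - pk.1) [])
                             (jx.1 + M - 1 - qv.1) 0))) out) (Mk OH OW f)
    = Mk OH OW (fun i j => f i j + ((List.range ks.length).map (fun p =>
        ((List.range (ks.getD p []).length).map (fun q =>
          (ks.getD p []).getD q 0 *
            PySem.List.pyGetD (PySem.List.pyGetD image ((i : Int) + N - 1 - (p0 + (p : Int))) [])
              ((j : Int) + M - 1 - (q : Int)) 0)).sum)).sum) := by
  intro ks
  induction ks with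
  | nil =>
    intro p0 OH OW f
    simp only [PySem.List.enumerate, List.foldl_nil, List.length_nil, List.range_zero,
      List.map_nil, List.sum_nil]
    exact Mk_congr (fun i _ j _ => by ring)
  | cons krow t ih =>
    intro p0 OH OW f
    have hcons : PySem.List.enumerate (krow :: t) p0
        = (p0, krow) :: PySem.List.enumerate t (p0 + 1) := by
      simp [PySem.List.enumerate]
    rw [hcons, List.foldl_cons, row_fold, ih]
    apply Mk_congr
    intro i _ j _
    rw [List.length_cons, List.range_succ_eq_map, List.map_cons, List.map_map, List.sum_cons]
    rw [add_assoc]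
    congr 1
    congr 1
    · simp only [List.getD_cons_zero, Nat.cast_zero, add_zero]
      apply congrArg
      apply List.map_congr_left
      intro q _
      congr 3
      ring
    · apply congrArg
      apply List.map_congr_left
      intro p _
      simp only [Function.comp_apply, List.getD_cons_succ, Nat.succ_eq_add_one]
      apply congrArg
      apply List.map_congr_left
      intro q _
      congr 3
      push_cast; ring

-- B computes, entrywise, the sum of the kernel entries times the correspondingly shifted pixels
theorem solve_alt_eq (image kernel : List (List Int)) :
    solve_alt image kernel
      = Mk ((image.length : Int) - kernel.length + 1).toNat
           (((image.headD []).length : Int) - (kernel.headD []).length + 1).toNat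
           (fun i j => ((List.range kernel.length).map (fun p =>
              ((List.range (kernel.getD p []).length).map (fun q =>
                (kernel.getD p []).getD q 0 *
                  PySem.List.pyGetD
                    (PySem.List.pyGetD image ((i : Int) + kernel.length - 1 - (p : Int)) [])
                    ((j : Int) + (kernel.headD []).length - 1 - (q : Int)) 0)).sum)).sum) := by
  unfold solve_alt
  simp only [PySem.List.len]
  rw [pyGetD_zero_headD, pyGetD_zero_headD]
  have hinit : List.replicate ((image.length : Int) - kernel.length + 1).toNat
        (List.replicate (((image.headD []).length : Int) - (kernel.headD []).length + 1).toNat (0 : Int))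
      = Mk ((image.length : Int) - kernel.length + 1).toNat
           (((image.headD []).length : Int) - (kernel.headD []).length + 1).toNat
           (fun _ _ => 0) := by
    unfold Mk
    simp [List.map_const']
  rw [hinit, outer_fold]
  apply Mk_congr
  intro i _ j _
  rw [zero_add]
  apply congrArg
  apply List.map_congr_left
  intro p _
  apply congrArg
  apply List.map_congr_left
  intro q _
  rw [zero_add]

-- A's inner_product as a double sum
theorem innerProduct_sum (A B : List (List Int)) :
    innerProduct A B = ((List.range A.length).map (fun i =>
      ((List.range (A.headD []).length).map (fun j =>
        (A.getD i []).getD j 0 * (B.getD i []).getD j 0)).sum)).sum := by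
  unfold innerProduct
  simp only [PySem.List.len]
  rw [pyGetD_zero_headD, pyRange0, pyRange0, Int.toNat_natCast, Int.toNat_natCast]
  simp only [PySem.List.foldl_add, List.map_map, zero_add]
  apply congrArg
  apply List.map_congr_left
  intro i _
  simp only [Function.comp_apply]
  apply congrArg
  apply List.map_congr_left
  intro j _
  simp only [Function.comp_apply, PySem.List.pyGetD_natCast]

-- reindexing the doubly reflected sum
theorem sum_reflect (n m : Nat) (F G : Nat → Nat → Int) :
    ∑ k ∈ Finset.range n, ∑ l ∈ Finset.range m, F k l * G (n - 1 - k) (m - 1 - l)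
      = ∑ p ∈ Finset.range n, ∑ q ∈ Finset.range m, G p q * F (n - 1 - p) (m - 1 - q) := by
  conv_lhs => rw [← Finset.sum_range_reflect]
  apply Finset.sum_congr rfl
  intro p hp
  have hp' := Finset.mem_range.mp hp
  conv_lhs => rw [← Finset.sum_range_reflect]
  apply Finset.sum_congr rfl
  intro q hq
  have hq' := Finset.mem_range.mp hq
  rw [show n - 1 - (n - 1 - p) = p by omega, show m - 1 - (m - 1 - q) = q by omega]
  ring

-- ===== VERDICT (by name: the statement is the Claim_ definition above) =====
theorem solve_spec : Claim_equal_solve := by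
  intro image kernel _ pre
  obtain ⟨hineq, hkneq, hkmin, hbr⟩ := pre
  unfold Spec_solve
  rw [solve_alt_eq]
  unfold solve
  simp only [PySem.List.len]
  rw [pyGetD_zero_headD, pyGetD_zero_headD]
  rw [pyRange0 ((image.length : Int) - kernel.length + 1),
      pyRange0 (((image.headD []).length : Int) - (kernel.headD []).length + 1)]
  unfold Mk
  rw [List.map_map]
  apply List.map_congr_left
  intro i hi
  simp only [Function.comp_apply]
  rw [List.map_map]
  apply List.map_congr_left
  intro j hj
  simp only [Function.comp_apply]
  have hi' : i < ((image.length : Int) - kernel.length + 1).toNat := List.mem_range.mp hi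
  have hj' : j < (((image.headD []).length : Int) - (kernel.headD []).length + 1).toNat :=
    List.mem_range.mp hj
  have hN : 0 < kernel.length := List.length_pos_iff.mpr hkneq
  have hiH : i + kernel.length ≤ image.length := by omega
  have hjW : j + (kernel.headD []).length ≤ (image.headD []).length := by omega
  obtain ⟨himg, hker⟩ : (∀ r ∈ image, (image.headD []).length ≤ r.length) ∧
      (∀ r ∈ kernel, r.length = (kernel.headD []).length) := by
    rcases hbr with h | h | h
    · exact h
    · exact absurd hiH (by omega)
    · exact absurd hjW (by omega)
  have hrow : ∀ k, k < kernel.length → (image.headD []).length ≤ (image.getD (i + k) []).length := by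
    intro k hk
    have hlt : i + k < image.length := by omega
    rw [List.getD_eq_getElem _ _ hlt]
    exact himg _ (List.getElem_mem hlt)
  have hkrow : ∀ p, p < kernel.length → (kernel.getD p []).length = (kernel.headD []).length := by
    intro p hp
    rw [List.getD_eq_getElem _ _ hp]
    exact hker _ (List.getElem_mem hp)
  have eAm : (List.map (fun k => PySem.List.slice (PySem.List.pyGetD image ((i : Int) + k) [])
        (some (j : Int)) (some ((j : Int) + ((kernel.headD []).length : Int))))
        (PySem.List.pyRange 0 (kernel.length : Int)))
      = (List.range kernel.length).map (fun k =>
          List.take (kernel.headD []).length (List.drop j (image.getD (i + k) []))) := by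
    rw [pyRange0, Int.toNat_natCast, List.map_map]
    apply List.map_congr_left
    intro k hk
    simp only [Function.comp_apply]
    rw [show ((i : Int) + (k : Int)) = ((i + k : Nat) : Int) by push_cast; ring,
      PySem.List.pyGetD_natCast]
    rw [show ((j : Int) + ((kernel.headD []).length : Int))
        = ((j + (kernel.headD []).length : Nat) : Int) by push_cast; ring,
      PySem.List.slice_natCast]
    congr 1
    omega
  have eCk : (List.map (fun a => List.map
        (fun b => PySem.List.pyGetD (PySem.List.pyGetD kernel a []) b 0)
        (PySem.List.pyRange (((kernel.headD []).length : Int) - 1) (-1) (-1)))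
        (PySem.List.pyRange ((kernel.length : Int) - 1) (-1) (-1)))
      = (List.range kernel.length).map (fun p => (List.range (kernel.headD []).length).map (fun q =>
          (kernel.getD (kernel.length - 1 - p) []).getD ((kernel.headD []).length - 1 - q) 0)) := by
    rw [pyRangeRev, pyRangeRev, List.map_map]
    apply List.map_congr_left
    intro p hp
    have hp' := List.mem_range.mp hp
    simp only [Function.comp_apply]
    rw [List.map_map]
    rw [show ((kernel.length : Int) - 1 - (p : Int)) = ((kernel.length - 1 - p : Nat) : Int) by
        omega, PySem.List.pyGetD_natCast]
    apply List.map_congr_left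
    intro q hq
    have hq' := List.mem_range.mp hq
    simp only [Function.comp_apply]
    rw [show (((kernel.headD []).length : Int) - 1 - (q : Int))
        = (((kernel.headD []).length - 1 - q : Nat) : Int) by omega, PySem.List.pyGetD_natCast]
  rw [eAm, eCk, innerProduct_sum]
  simp only [List.length_map, List.length_range]
  have hA0len : (((List.range kernel.length).map (fun k =>
        List.take (kernel.headD []).length (List.drop j (image.getD (i + k) [])))).headD []).length
      = (kernel.headD []).length := by
    obtain ⟨m, hm⟩ : ∃ m, kernel.length = m + 1 := ⟨kernel.length - 1, by omega⟩
    rw [hm, List.range_succ_eq_map, List.map_cons]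
    simp only [List.headD_cons]
    rw [List.length_take, List.length_drop]
    have := hrow 0 (by omega)
    omega
  rw [hA0len]
  simp only [← sum_list_range]
  have eL : (∑ k ∈ Finset.range kernel.length, ∑ l ∈ Finset.range (kernel.headD []).length,
        (((List.range kernel.length).map (fun k =>
          List.take (kernel.headD []).length (List.drop j (image.getD (i + k) [])))).getD k []).getD l 0 *
        (((List.range kernel.length).map (fun p => (List.range (kernel.headD []).length).map (fun q =>
          (kernel.getD (kernel.length - 1 - p) []).getD ((kernel.headD []).length - 1 - q) 0))).getD k []).getD l 0)
      = ∑ k ∈ Finset.range kernel.length, ∑ l ∈ Finset.range (kernel.headD []).length,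
        (image.getD (i + k) []).getD (j + l) 0 *
        (kernel.getD (kernel.length - 1 - k) []).getD ((kernel.headD []).length - 1 - l) 0 := by
    apply Finset.sum_congr rfl
    intro k hk
    have hk' := Finset.mem_range.mp hk
    apply Finset.sum_congr rfl
    intro l hl
    have hl' := Finset.mem_range.mp hl
    rw [PySem.List.getD_map_range _ _ _ _ hk', PySem.List.getD_map_range _ _ _ _ hk',
      PySem.List.getD_map_range _ _ _ _ hl',
      take_drop_getD _ _ _ _ hl' (by have := hrow k hk'; omega)]
  have eR : (∑ p ∈ Finset.range kernel.length, ∑ q ∈ Finset.range (kernel.getD p []).length,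
        (kernel.getD p []).getD q 0 *
          PySem.List.pyGetD (PySem.List.pyGetD image ((i : Int) + kernel.length - 1 - (p : Int)) [])
            ((j : Int) + ((kernel.headD []).length : Int) - 1 - (q : Int)) 0)
      = ∑ p ∈ Finset.range kernel.length, ∑ q ∈ Finset.range (kernel.headD []).length,
        (kernel.getD p []).getD q 0 *
          (image.getD (i + (kernel.length - 1 - p)) []).getD (j + ((kernel.headD []).length - 1 - q)) 0 := by
    apply Finset.sum_congr rfl
    intro p hp
    have hp' := Finset.mem_range.mp hp
    rw [hkrow p hp']
    apply Finset.sum_congr rfl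
    intro q hq
    have hq' := Finset.mem_range.mp hq
    rw [show ((i : Int) + kernel.length - 1 - (p : Int))
        = ((i + (kernel.length - 1 - p) : Nat) : Int) by omega, PySem.List.pyGetD_natCast]
    rw [show ((j : Int) + ((kernel.headD []).length : Int) - 1 - (q : Int))
        = ((j + ((kernel.headD []).length - 1 - q) : Nat) : Int) by omega,
      PySem.List.pyGetD_natCast]
  rw [eL, eR]
  exact sum_reflect kernel.length (kernel.headD []).length
    (fun a b => (image.getD (i + a) []).getD (j + b) 0)
    (fun a b => (kernel.getD a []).getD b 0)
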